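-- pv_equiv track=rewrite | github.com/goblin-cola/genai_study_guide | genai_coding_examples.py | sliding_window_counts
-- ===== SOURCE A (Python) =====
-- from collections import defaultdict, deque
-- from typing import Deque, Dict, Iterable, List, Sequence, Tuple, Optional
--
-- def sliding_window_counts(
--     events: Sequence[Tuple[str, float, int]],
--     window_seconds: int,
-- ) -> List[Tuple[str, int, int]]:
--     """For each event (user_id, amount, ts), output (user_id, ts, count_in_window).
--
--     Assumptions:
--       - events are ordered by timestamp ascending
--       - timestamps are integers (seconds)
--     Complexity: O(n) time, O(users * window) space.
--     """
--     if window_seconds < 0: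
--         raise ValueError("window_seconds must be >= 0")
--
--     per_user: Dict[str, Deque[int]] = defaultdict(deque)
--     out: List[Tuple[str, int, int]] = []
--
--     for user_id, _amount, ts in events:
--         q = per_user[user_id]
--         q.append(ts)
--         cutoff = ts - window_seconds
--         while q and q[0] < cutoff:
--             q.popleft()
--         out.append((user_id, ts, len(q)))
--
--     return out
-- ===== SOURCE B (Python) =====
-- from collections import defaultdict
-- from typing import Dict, List, Sequence, Tuple
--
--
-- def sliding_window_counts(
--     events: Sequence[Tuple[str, float, int]],
--     window_seconds: int,
-- ) -> List[Tuple[str, int, int]]: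
--     """Group-by / two-pointer re-implementation: gather each user's timestamps,
--     precompute every in-window count with a never-retreating front pointer,
--     then emit results in event order."""
--     if window_seconds < 0:
--         raise ValueError("window_seconds must be >= 0")
--
--     ts_by_user: Dict[str, List[int]] = defaultdict(list)
--     for user_id, _amount, ts in events:
--         ts_by_user[user_id].append(ts)
--
--     counts = {u: _window_counts(tss, window_seconds) for u, tss in ts_by_user.items()}
--
--     seen: Dict[str, int] = defaultdict(int)
--     out: List[Tuple[str, int, int]] = []
--     for user_id, _amount, ts in events:
--         k = seen[user_id]
--         seen[user_id] = k + 1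
--         out.append((user_id, ts, counts[user_id][k]))
--     return out
--
--
-- def _window_counts(tss: List[int], window_seconds: int) -> List[int]:
--     j = 0
--     cs: List[int] = []
--     for k, t in enumerate(tss):
--         cutoff = t - window_seconds
--         while j <= k and tss[j] < cutoff:
--             j += 1
--         cs.append(k + 1 - j)
--     return cs
-- ===== Notes on version B (the rewrite author's own statement) =====
-- stated objective: alternative
-- what changed: Replaces the online dict-of-deques sliding window by a three-pass group-by: collect each user's timestamps, precompute all counts per user with a single never-retreating two-pointer scan over the immutable list, then emit results in event order via per-user cursors.
import Mathlib
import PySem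

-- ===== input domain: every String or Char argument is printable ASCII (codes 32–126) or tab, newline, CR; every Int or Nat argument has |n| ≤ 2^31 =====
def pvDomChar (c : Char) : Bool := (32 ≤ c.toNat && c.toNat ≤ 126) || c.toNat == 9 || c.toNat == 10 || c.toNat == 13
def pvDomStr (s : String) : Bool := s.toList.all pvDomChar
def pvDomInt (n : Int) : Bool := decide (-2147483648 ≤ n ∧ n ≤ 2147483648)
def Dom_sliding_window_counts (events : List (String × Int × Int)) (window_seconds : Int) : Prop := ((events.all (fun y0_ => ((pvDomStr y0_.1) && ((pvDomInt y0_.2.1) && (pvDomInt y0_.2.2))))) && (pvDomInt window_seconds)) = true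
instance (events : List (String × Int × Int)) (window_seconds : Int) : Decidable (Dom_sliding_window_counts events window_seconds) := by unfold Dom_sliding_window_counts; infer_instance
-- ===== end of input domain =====

-- B replaces A's online dict-of-deques window by a group-by + per-user two-pointer precomputation
-- (objective: alternative structure, same asymptotic cost). Return-value equivalence only.

-- ===== PORT A =====
-- the `while q and q[0] < cutoff: q.popleft()` loop
def pvPopA (q : List Int) (cutoff : Int) : List Int :=
  match q with
  | [] => []
  | t :: rest => if t < cutoff then pvPopA rest cutoff else t :: rest

def pvStepA (w : Int) (st : PySem.Dict String (List Int) × List (String × Int × Int))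
    (e : String × Int × Int) : PySem.Dict String (List Int) × List (String × Int × Int) :=
  let q := st.1.getD e.1 []            -- q = per_user[user_id] (defaultdict: missing key = [])
  let q2 := pvPopA (q ++ [e.2.2]) (e.2.2 - w)   -- q.append(ts); pop loop (q mutated in place)
  (st.1.insert e.1 q2, st.2 ++ [(e.1, e.2.2, (q2.length : Int))])

def sliding_window_counts (events : List (String × Int × Int)) (window_seconds : Int) :
    List (String × Int × Int) :=
  (events.foldl (pvStepA window_seconds) (PySem.Dict.empty, [])).2

-- ===== PORT B =====
-- the `while j <= k and tss[j] < cutoff: j += 1` loop (tss[j] is in range whenever read: j ≤ k < len)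
def pvAdvance (tss : List Int) (cutoff : Int) (k j : Nat) : Nat :=
  if h : j ≤ k then
    (if tss.getD j 0 < cutoff then pvAdvance tss cutoff k (j + 1) else j)
  else j
termination_by k + 1 - j

-- _window_counts: one two-pointer pass over a user's timestamp list
def pvWindowCounts (w : Int) (tss : List Int) : List Int :=
  (tss.foldl
    (fun (st : Nat × Nat × List Int) t =>
      let j := pvAdvance tss (t - w) st.2.1 st.1
      (j, st.2.1 + 1, st.2.2 ++ [((st.2.1 : Int) + 1 - (j : Int))]))
    (0, 0, [])).2.2

def sliding_window_counts_alt (events : List (String × Int × Int)) (window_seconds : Int) :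
    List (String × Int × Int) :=
  let tsBy : PySem.Dict String (List Int) :=
    events.foldl (fun d e => d.modify e.1 [] (· ++ [e.2.2])) PySem.Dict.empty
  let counts : PySem.Dict String (List Int) :=
    PySem.Dict.mk (tsBy.items.map (fun p => (p.1, pvWindowCounts window_seconds p.2)))
  (events.foldl
    (fun (st : PySem.Dict String Nat × List (String × Int × Int)) e =>
      let k := st.1.getD e.1 0        -- seen[user_id] (defaultdict(int))
      (st.1.insert e.1 (k + 1),
       st.2 ++ [(e.1, e.2.2, (counts.getD e.1 []).getD k 0)]))  -- counts[u][k], in range by construction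
    (PySem.Dict.empty, [])).2

-- ===== PRECONDITION & SPEC =====
-- Pre_ excludes exactly window_seconds < 0, where the Python A raises ValueError (B raises too).
def Pre_sliding_window_counts (events : List (String × Int × Int)) (window_seconds : Int) : Prop :=
  0 ≤ window_seconds
instance (events : List (String × Int × Int)) (window_seconds : Int) : Decidable (Pre_sliding_window_counts events window_seconds) := by unfold Pre_sliding_window_counts; infer_instance

def pvWitness_sliding_window_counts : (List (String × Int × Int)) × Int :=
  ([("a", 1, 10), ("b", 2, 11), ("a", 3, 13)], 3)

def Spec_sliding_window_counts (events : List (String × Int × Int)) (window_seconds : Int) (out : List (String × Int × Int)) : Prop := out = sliding_window_counts_alt events window_seconds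
instance (events : List (String × Int × Int)) (window_seconds : Int) (out : List (String × Int × Int)) : Decidable (Spec_sliding_window_counts events window_seconds out) := by unfold Spec_sliding_window_counts; infer_instance

-- ===== CLAIM (what is proved, stated in full; the proofs are below) =====
def Claim_equal_sliding_window_counts : Prop := ∀ (events : List (String × Int × Int)) (window_seconds : Int), Dom_sliding_window_counts events window_seconds → Pre_sliding_window_counts events window_seconds → Spec_sliding_window_counts events window_seconds (sliding_window_counts events window_seconds)

-- ===== LEMMAS AND PROOFS =====

-- that user's timestamps, in order
def pvTsOf (u : String) (l : List (String × Int × Int)) : List Int :=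
  l.filterMap (fun e => if e.1 = u then some e.2.2 else none)

-- the deque a user's timestamp history evolves to
def pvDeque (w : Int) (tss : List Int) : List Int :=
  tss.foldl (fun q t => pvPopA (q ++ [t]) (t - w)) []

-- reference output: each event's count from the deque of its user's history so far
def pvOut (w : Int) (hist events : List (String × Int × Int)) : List (String × Int × Int) :=
  match events with
  | [] => []
  | e :: rest =>
      (e.1, e.2.2, ((pvDeque w (pvTsOf e.1 (hist ++ [e]))).length : Int)) ::
        pvOut w (hist ++ [e]) rest

theorem pvTsOf_append (u : String) (l l' : List (String × Int × Int)) :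
    pvTsOf u (l ++ l') = pvTsOf u l ++ pvTsOf u l' := by
  simp [pvTsOf]

theorem pvTsOf_singleton (u : String) (e : String × Int × Int) :
    pvTsOf u [e] = if e.1 = u then [e.2.2] else [] := by
  simp only [pvTsOf, List.filterMap]; split <;> simp_all

theorem pvDeque_append (w : Int) (l : List Int) (t : Int) :
    pvDeque w (l ++ [t]) = pvPopA (pvDeque w l ++ [t]) (t - w) := by
  simp [pvDeque]

-- A's fold equals the reference output
theorem pvA_fold (w : Int) (events : List (String × Int × Int)) :
    ∀ (hist : List (String × Int × Int)) (d : PySem.Dict String (List Int))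
      (out : List (String × Int × Int)),
      (∀ u, d.getD u [] = pvDeque w (pvTsOf u hist)) →
      (events.foldl (pvStepA w) (d, out)).2 = out ++ pvOut w hist events := by
  induction events with
  | nil => intro hist d out _; simp [pvOut]
  | cons e rest ih =>
    intro hist d out hinv
    have hq : d.getD e.1 [] = pvDeque w (pvTsOf e.1 hist) := hinv e.1
    have hq2 : pvPopA (d.getD e.1 [] ++ [e.2.2]) (e.2.2 - w)
        = pvDeque w (pvTsOf e.1 (hist ++ [e])) := by
      rw [hq, pvTsOf_append, pvTsOf_singleton, if_pos rfl, ← pvDeque_append]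
    simp only [List.foldl_cons, pvStepA]
    rw [ih (hist ++ [e]) _ _ ?_]
    · simp [pvOut, hq2]
    · intro u
      rw [PySem.Dict.getD_insert]
      by_cases hu : u = e.1
      · subst hu; rw [if_pos rfl, hq2]
      · rw [if_neg hu, pvTsOf_append, pvTsOf_singleton,
          if_neg (fun h => hu h.symm), List.append_nil]
        exact hinv u

-- the while-pop on a contiguous suffix equals the two-pointer advance
theorem pvPopA_advance (T : List Int) (w t : Int) (hw : 0 ≤ w) (m : Nat)
    (hm : m < T.length) (ht : T.getD m 0 = t) :
    ∀ j, j ≤ m →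
      pvPopA ((T.take (m+1)).drop j) (t - w) = (T.take (m+1)).drop (pvAdvance T (t - w) m j) ∧
      pvAdvance T (t - w) m j ≤ m := by
  suffices h : ∀ (n j : Nat), m + 1 - j ≤ n → j ≤ m →
      pvPopA ((T.take (m+1)).drop j) (t - w) = (T.take (m+1)).drop (pvAdvance T (t - w) m j) ∧
      pvAdvance T (t - w) m j ≤ m by
    intro j hj; exact h (m + 1) j (by omega) hj
  intro n
  induction n with
  | zero => intro j h1 h2; omega
  | succ n ihn =>
    intro j hn hj
    have hjlen : j < (T.take (m+1)).length := by simp; omega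
    have hjT : j < T.length := by omega
    have hgd : T.getD j 0 = T[j] := List.getD_eq_getElem T 0 hjT
    have hcons : (T.take (m+1)).drop j = T[j] :: (T.take (m+1)).drop (j+1) := by
      rw [← List.getElem_cons_drop hjlen, List.getElem_take]
    rw [pvAdvance, dif_pos hj, hcons]
    by_cases hlt : T.getD j 0 < t - w
    · have hjm : j ≠ m := by
        intro h; rw [h, ht] at hlt; omega
      rw [if_pos hlt, pvPopA, if_pos (hgd ▸ hlt)]
      exact ihn (j+1) (by omega) (by omega)
    · rw [if_neg hlt, pvPopA, if_neg (hgd ▸ hlt), ← hcons]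
      exact ⟨rfl, hj⟩

-- invariant of the two-pointer scan
theorem pvCounts_fold (T : List Int) (w : Int) (hw : 0 ≤ w) :
    ∀ (rest : List Int) (m j : Nat) (acc : List Int),
      T.drop m = rest → j ≤ m → m ≤ T.length →
      pvDeque w (T.take m) = (T.take m).drop j →
      (rest.foldl
        (fun (st : Nat × Nat × List Int) t =>
          let j := pvAdvance T (t - w) st.2.1 st.1
          (j, st.2.1 + 1, st.2.2 ++ [((st.2.1 : Int) + 1 - (j : Int))])) (j, m, acc)).2.2
      = acc ++ (List.range rest.length).map
            (fun i => ((pvDeque w (T.take (m + i + 1))).length : Int)) := by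
  intro rest
  induction rest with
  | nil => intro m j acc _ _ _ _; simp
  | cons t rest' ih =>
    intro m j acc hdrop hj hmle hdq
    have hm : m < T.length := by
      have := congrArg List.length hdrop; simp at this; omega
    have hcd : T[m] :: T.drop (m+1) = t :: rest' := by
      rw [List.getElem_cons_drop hm, hdrop]
    have htm : T[m] = t := by injection hcd
    have hdrop' : T.drop (m+1) = rest' := by injection hcd
    have ht : T.getD m 0 = t := by rw [List.getD_eq_getElem T 0 hm, htm]
    obtain ⟨hpop, hle⟩ := pvPopA_advance T w t hw m hm ht j hj
    have htake : T.take (m+1) = T.take m ++ [t] := by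
      rw [List.take_succ_eq_append_getElem hm, htm]
    have hjoin : (T.take m).drop j ++ [t] = (T.take (m+1)).drop j := by
      rw [htake, List.drop_append_of_le_length (by simp; omega)]
    have hdq' : pvDeque w (T.take (m+1)) = (T.take (m+1)).drop (pvAdvance T (t - w) m j) := by
      rw [htake, pvDeque_append, hdq, hjoin, hpop, htake]
    have hlenN : (pvDeque w (T.take (m+1))).length = m + 1 - pvAdvance T (t - w) m j := by
      rw [hdq', List.length_drop, List.length_take]; omega
    have hlen : ((pvDeque w (T.take (m+1))).length : Int)
        = (m : Int) + 1 - (pvAdvance T (t - w) m j : Int) := by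
      rw [hlenN]; push_cast [Nat.cast_sub (by omega : pvAdvance T (t - w) m j ≤ m + 1)]; ring
    simp only [List.foldl_cons]
    rw [ih (m+1) (pvAdvance T (t - w) m j) (acc ++ [(m : Int) + 1 - (pvAdvance T (t - w) m j : Int)])
      hdrop' (by omega) (by omega) hdq']
    rw [List.length_cons, List.range_succ_eq_map, List.map_cons, List.map_map,
      List.append_assoc, List.singleton_append]
    congr 1
    congr 1
    · simpa using hlen.symm
    · apply List.map_congr_left
      intro i _
      simp only [Function.comp_apply]
      have harith : m + 1 + i + 1 = m + (i + 1) + 1 := by omega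
      rw [harith]

theorem pvWindowCounts_getD (w : Int) (hw : 0 ≤ w) (T : List Int) (k : Nat) (hk : k < T.length) :
    (pvWindowCounts w T).getD k 0 = ((pvDeque w (T.take (k+1))).length : Int) := by
  have h := pvCounts_fold T w hw T 0 0 [] rfl le_rfl (Nat.zero_le _) (by simp [pvDeque])
  unfold pvWindowCounts
  rw [h, List.nil_append]
  have := PySem.List.getD_map_range
    (fun i => ((pvDeque w (T.take (0 + i + 1))).length : Int)) T.length k 0 hk
  simpa using this

theorem pvFilterHelper (l : List (String × Int × Int)) (u : String) :
    List.map (fun x => x.2) (List.filter (fun p => p.1 == u) (l.map (fun e => (e.1, e.2.2))))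
      = pvTsOf u l := by
  induction l with
  | nil => simp [pvTsOf]
  | cons e rest ih =>
    simp only [List.map_cons, List.filter_cons, pvTsOf, List.filterMap_cons] at *
    by_cases he : e.1 = u
    · simp [he, ih]
    · have hb : ((e.1, e.2.2).1 == u) = false := by simpa using he
      simp [hb, he, ih]

-- the grouping pass collects exactly pvTsOf
theorem pvTsBy_getD (events : List (String × Int × Int)) (u : String) :
    (events.foldl (fun d e => d.modify e.1 [] (· ++ [e.2.2])) PySem.Dict.empty).getD u []
      = pvTsOf u events := by
  have hmap : events.foldl (fun d e => d.modify e.1 [] (· ++ [e.2.2])) PySem.Dict.empty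
      = (events.map (fun e => (e.1, e.2.2))).foldl
          (fun d p => d.modify p.1 [] (fun x => x ++ [p.2])) PySem.Dict.empty := by
    rw [List.foldl_map]
  rw [hmap, PySem.Dict.getD_foldl_modify_append, PySem.Dict.getD_empty, List.nil_append]
  exact pvFilterHelper events u

-- a mapped literal dict looks up through the map
theorem pvGet?_mk_map (l : List (String × List Int)) (f : List Int → List Int) (u : String) :
    (PySem.Dict.mk (l.map (fun p => (p.1, f p.2)))).get? u = ((PySem.Dict.mk l).get? u).map f := by
  induction l with
  | nil => simp [PySem.Dict.get?]
  | cons p rest ih =>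
    simp only [List.map_cons]
    rw [PySem.Dict.get?_mk_cons, PySem.Dict.get?_mk_cons]
    by_cases hp : (p.1 == u) = true
    · simp [hp]
    · simp [hp, ih]

-- B's final pass equals the reference output
theorem pvB_fold (w : Int) (counts : PySem.Dict String (List Int))
    (full : List (String × Int × Int)) (hw : 0 ≤ w)
    (hc : ∀ u, u ∈ full.map (·.1) → counts.getD u [] = pvWindowCounts w (pvTsOf u full)) :
    ∀ (rest hist : List (String × Int × Int)) (seen : PySem.Dict String Nat)
      (out : List (String × Int × Int)),
      full = hist ++ rest →
      (∀ u, seen.getD u 0 = (pvTsOf u hist).length) →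
      (rest.foldl
        (fun (st : PySem.Dict String Nat × List (String × Int × Int)) e =>
          let k := st.1.getD e.1 0
          (st.1.insert e.1 (k + 1),
           st.2 ++ [(e.1, e.2.2, (counts.getD e.1 []).getD k 0)])) (seen, out)).2
      = out ++ pvOut w hist rest := by
  intro rest
  induction rest with
  | nil => intro hist seen out _ _; simp [pvOut]
  | cons e rest' ih =>
    intro hist seen out hfull hseen
    have hk : seen.getD e.1 0 = (pvTsOf e.1 hist).length := hseen e.1
    have hT : pvTsOf e.1 full = pvTsOf e.1 hist ++ e.2.2 :: pvTsOf e.1 rest' := by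
      rw [hfull, pvTsOf_append]
      congr 1
      rw [show (e :: rest') = [e] ++ rest' from rfl, pvTsOf_append, pvTsOf_singleton, if_pos rfl]
      rfl
    have hmem : e.1 ∈ full.map (·.1) := by
      rw [hfull]; simp
    have hklt : (pvTsOf e.1 hist).length < (pvTsOf e.1 full).length := by
      rw [hT]; simp
    have htake : (pvTsOf e.1 full).take ((pvTsOf e.1 hist).length + 1)
        = pvTsOf e.1 (hist ++ [e]) := by
      rw [hT,
        show pvTsOf e.1 hist ++ e.2.2 :: pvTsOf e.1 rest'
            = (pvTsOf e.1 hist ++ [e.2.2]) ++ pvTsOf e.1 rest' by simp,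
        show (pvTsOf e.1 hist).length + 1 = (pvTsOf e.1 hist ++ [e.2.2]).length by simp,
        List.take_left, pvTsOf_append, pvTsOf_singleton, if_pos rfl]
    have hval : (counts.getD e.1 []).getD (seen.getD e.1 0) 0
        = ((pvDeque w (pvTsOf e.1 (hist ++ [e]))).length : Int) := by
      rw [hc e.1 hmem, hk, pvWindowCounts_getD w hw _ _ hklt, htake]
    simp only [List.foldl_cons]
    rw [ih (hist ++ [e]) _ _ (by rw [hfull, List.append_assoc]; rfl) ?_]
    · have hval' := hval
      simp only [List.getD] at hval'
      simp [pvOut, hval']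
    · intro u
      rw [PySem.Dict.getD_insert]
      by_cases hu : u = e.1
      · subst hu
        rw [if_pos rfl, pvTsOf_append, pvTsOf_singleton, if_pos rfl, hk]
        simp
      · rw [if_neg hu, pvTsOf_append, pvTsOf_singleton, if_neg (fun h => hu h.symm),
          List.append_nil]
        exact hseen u

-- ===== VERDICT (by name: the statement is the Claim_ definition above) =====
theorem sliding_window_counts_spec : Claim_equal_sliding_window_counts := by
  intro events w _ hw
  unfold Spec_sliding_window_counts
  have hA : sliding_window_counts events w = pvOut w [] events := by
    unfold sliding_window_counts
    rw [pvA_fold w events [] _ _ (by intro u; simp [pvTsOf, pvDeque, PySem.Dict.getD_empty])]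
    simp
  have hc : ∀ u, u ∈ events.map (·.1) →
      (PySem.Dict.mk ((events.foldl (fun d e => d.modify e.1 [] (· ++ [e.2.2]))
          PySem.Dict.empty).items.map (fun p => (p.1, pvWindowCounts w p.2)))).getD u []
        = pvWindowCounts w (pvTsOf u events) := by
    intro u hu
    have hkeys : (events.foldl (fun d e => d.modify e.1 [] (· ++ [e.2.2]))
        PySem.Dict.empty).keys = PySem.Set.ofList (events.map (·.1)) := by
      rw [PySem.Dict.keys_foldl_modify_key events (·.1) []
        (fun _ e => (· ++ [e.2.2])) PySem.Dict.empty, PySem.Dict.keys_empty,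
        PySem.Set.update_nil_left]
    have hcontains : (events.foldl (fun d e => d.modify e.1 [] (· ++ [e.2.2]))
        PySem.Dict.empty).contains u = true := by
      rw [PySem.Dict.contains_iff_mem_keys, hkeys, PySem.Set.mem_ofList]
      exact hu
    obtain ⟨v, hv⟩ : ∃ v, (events.foldl (fun d e => d.modify e.1 [] (· ++ [e.2.2]))
        PySem.Dict.empty).get? u = some v := by
      rw [PySem.Dict.contains_eq_isSome_get?] at hcontains
      exact Option.isSome_iff_exists.mp hcontains
    have hveq : v = pvTsOf u events := by
      have := pvTsBy_getD events u
      rw [PySem.Dict.getD_eq_get?_getD, hv] at this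
      simpa using this
    rw [PySem.Dict.getD_eq_get?_getD, pvGet?_mk_map, hv, hveq]
    rfl
  have hB : sliding_window_counts_alt events w = pvOut w [] events := by
    have hfold := pvB_fold w
      (PySem.Dict.mk ((events.foldl (fun d e => d.modify e.1 [] (· ++ [e.2.2]))
        PySem.Dict.empty).items.map (fun p => (p.1, pvWindowCounts w p.2))))
      events hw hc events [] PySem.Dict.empty [] rfl
      (by intro u; simp [pvTsOf, PySem.Dict.getD_empty])
    simpa [sliding_window_counts_alt] using hfold
  rw [hA, hB]
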